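-- pv_equiv track=rewrite | github.com/frontenddeveloper-lab/Phormula-tool | backend/app/routes/pie_chart_routes.py | get_quarter_from_month
-- ===== SOURCE A (Python) =====
-- QUARTER_MONTHS = {
--     "quarter1": ["january", "february", "march"],
--     "quarter2": ["april", "may", "june"],
--     "quarter3": ["july", "august", "september"],
--     "quarter4": ["october", "november", "december"]
-- }
--
-- def get_quarter_from_month(month):
--     """Get quarter name from month"""
--     if not month:
--         return None
--
--     month_lower = month.lower().strip()
--     for quarter, months in QUARTER_MONTHS.items():
--         if month_lower in months:
--             return quarter
--     return None
-- ===== SOURCE B (Python) =====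
-- MONTHS = ["january", "february", "march", "april", "may", "june",
--           "july", "august", "september", "october", "november", "december"]
--
-- def get_quarter_from_month(month):
--     """Get quarter name from month"""
--     if not month:
--         return None
--     try:
--         i = MONTHS.index(month.lower().strip())
--     except ValueError:
--         return None
--     return "quarter" + str(i // 3 + 1)
-- ===== Notes on version B (the rewrite author's own statement) =====
-- stated objective: alternative
-- what changed: Instead of scanning quarter buckets for membership, B finds the month's position in a flat ordered 12-month list and computes the quarter number arithmetically as index//3 + 1, building the quarter name from that number.
import Mathlib
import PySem

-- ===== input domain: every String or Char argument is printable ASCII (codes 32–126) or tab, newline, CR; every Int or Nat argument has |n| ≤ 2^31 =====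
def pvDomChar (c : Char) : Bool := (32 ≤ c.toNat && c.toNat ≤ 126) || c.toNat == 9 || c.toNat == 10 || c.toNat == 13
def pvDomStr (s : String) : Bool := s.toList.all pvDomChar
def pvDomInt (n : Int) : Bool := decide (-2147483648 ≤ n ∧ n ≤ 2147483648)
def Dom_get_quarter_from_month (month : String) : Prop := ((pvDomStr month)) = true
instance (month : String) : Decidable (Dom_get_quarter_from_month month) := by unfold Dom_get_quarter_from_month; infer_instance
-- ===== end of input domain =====

-- B replaces A's per-quarter membership scan by index arithmetic on a flat ordered month list
-- (quarter number = index // 3 + 1); alternative decomposition, same behaviour.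

-- ===== PORT A =====
def QUARTER_MONTHS : List (String × List String) :=
  [("quarter1", ["january", "february", "march"]),
   ("quarter2", ["april", "may", "june"]),
   ("quarter3", ["july", "august", "september"]),
   ("quarter4", ["october", "november", "december"])]

-- the 'for quarter, months in QUARTER_MONTHS.items(): if month_lower in months: return quarter' loop
def pvQuarterLoop : List (String × List String) → String → Option String
  | [], _ => none
  | (quarter, months) :: rest, ml =>
      if months.contains ml then some quarter else pvQuarterLoop rest ml

def get_quarter_from_month (month : String) : Option String :=
  if month = "" then none
  else pvQuarterLoop QUARTER_MONTHS (PySem.Str.strip (PySem.Str.lower month))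

-- ===== PORT B =====
def MONTHS : List String :=
  ["january", "february", "march", "april", "may", "june",
   "july", "august", "september", "october", "november", "december"]

-- try: i = MONTHS.index(...) except ValueError: return None; then "quarter" + str(i // 3 + 1)
def get_quarter_from_month_alt (month : String) : Option String :=
  if month = "" then none
  else
    match PySem.List.index? MONTHS (PySem.Str.strip (PySem.Str.lower month)) with
    | none => none
    | some i => some ("quarter" ++ PySem.Int.toStr ((i : Int) / 3 + 1))

-- ===== PRECONDITION & SPEC =====
def Spec_get_quarter_from_month (month : String) (out : Option String) : Prop := out = get_quarter_from_month_alt month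
instance (month : String) (out : Option String) : Decidable (Spec_get_quarter_from_month month out) := by unfold Spec_get_quarter_from_month; infer_instance

-- ===== CLAIM (what is proved, stated in full; the proofs are below) =====
def Claim_equal_get_quarter_from_month : Prop := ∀ (month : String), Dom_get_quarter_from_month month → Spec_get_quarter_from_month month (get_quarter_from_month month)

-- ===== LEMMAS AND PROOFS =====

-- the bucket scan and the index arithmetic agree on every string
theorem pvQuarterLoop_eq_index (s : String) :
    pvQuarterLoop QUARTER_MONTHS s =
      (match PySem.List.index? MONTHS s with
       | none => none
       | some i => some ("quarter" ++ PySem.Int.toStr ((i : Int) / 3 + 1))) := by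
  by_cases hm : s ∈ MONTHS
  · fin_cases hm <;> rfl
  · have hn : PySem.List.index? MONTHS s = none :=
      (PySem.List.index?_eq_none_iff MONTHS s).mpr hm
    rw [hn]
    simp only [MONTHS, List.mem_cons, List.not_mem_nil, or_false, not_or] at hm
    obtain ⟨h1, h2, h3, h4, h5, h6, h7, h8, h9, h10, h11, h12⟩ := hm
    simp [pvQuarterLoop, QUARTER_MONTHS, h1, h2, h3, h4, h5, h6, h7, h8, h9, h10, h11, h12]

-- ===== VERDICT (by name: the statement is the Claim_ definition above) =====
theorem get_quarter_from_month_spec : Claim_equal_get_quarter_from_month := by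
  intro month _
  unfold Spec_get_quarter_from_month get_quarter_from_month get_quarter_from_month_alt
  by_cases h : month = "" <;> simp [h, pvQuarterLoop_eq_index]
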